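-- pv_equiv track=rewrite | github.com/jhyun0414/medical_PRM | python/5_0401_PRM_finetuning.py | process_gemini_label
-- ===== SOURCE A (Python) =====
-- def process_gemini_label(label_list):
--     """
--     gemini_label 처리 함수:
--     0이 처음 등장한 이후의 모든 값을 0으로 변환
--     예: [1, 1, 0, 1, 0] -> [1, 1, 0, 0, 0]
--     """
--     processed_label = []
--     found_zero = False
--
--     for val in label_list:
--         if found_zero:
--             processed_label.append(0)
--         else:
--             processed_label.append(val)
--             if val == 0:
--                 found_zero = True
--
--     return processed_label
-- ===== SOURCE B (Python) =====
-- def process_gemini_label(label_list):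
--     if 0 not in label_list:
--         return list(label_list)
--     idx = label_list.index(0)
--     return list(label_list[:idx + 1]) + [0] * (len(label_list) - idx - 1)
-- ===== Notes on version B (the rewrite author's own statement) =====
-- stated objective: simpler
-- what changed: Replaces the element-by-element flag loop with a first-zero index lookup followed by a prefix-slice plus zero-fill construction.
import Mathlib
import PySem

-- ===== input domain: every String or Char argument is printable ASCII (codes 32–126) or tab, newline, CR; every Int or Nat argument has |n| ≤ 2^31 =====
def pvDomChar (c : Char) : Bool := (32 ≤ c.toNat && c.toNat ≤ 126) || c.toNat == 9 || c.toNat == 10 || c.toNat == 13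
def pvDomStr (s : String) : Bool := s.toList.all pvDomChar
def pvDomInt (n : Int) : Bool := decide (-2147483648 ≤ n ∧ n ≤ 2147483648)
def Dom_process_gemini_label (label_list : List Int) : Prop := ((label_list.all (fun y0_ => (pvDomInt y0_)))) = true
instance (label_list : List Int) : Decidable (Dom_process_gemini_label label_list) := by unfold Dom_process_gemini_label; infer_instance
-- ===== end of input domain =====

-- B zeroes the tail after the first zero via an index lookup plus slice/fill instead of A's flag loop; objective: simpler decomposition.

-- ===== PORT A =====
-- the for-loop over label_list carrying (processed_label, found_zero), transcribed as structural recursion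
def pvLoopA : List Int → Bool → List Int
  | [], _ => []
  | v :: rest, found =>
    if found then 0 :: pvLoopA rest found
    else v :: pvLoopA rest (found || decide (v = 0))

def process_gemini_label (label_list : List Int) : List Int :=
  pvLoopA label_list false

-- ===== PORT B =====
def process_gemini_label_alt (label_list : List Int) : List Int :=
  match PySem.List.index? label_list 0 with
  | none => label_list
  | some i => label_list.take (i + 1) ++ List.replicate (label_list.length - (i + 1)) 0

-- ===== PRECONDITION & SPEC =====
def Spec_process_gemini_label (label_list : List Int) (out : List Int) : Prop := out = process_gemini_label_alt label_list
instance (label_list : List Int) (out : List Int) : Decidable (Spec_process_gemini_label label_list out) := by unfold Spec_process_gemini_label; infer_instance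

-- ===== CLAIM (what is proved, stated in full; the proofs are below) =====
def Claim_equal_process_gemini_label : Prop := ∀ (label_list : List Int), Dom_process_gemini_label label_list → Spec_process_gemini_label label_list (process_gemini_label label_list)

-- ===== LEMMAS AND PROOFS =====

-- once the flag is set, the rest of A's loop emits only zeros
theorem pvLoopA_true (l : List Int) : pvLoopA l true = List.replicate l.length 0 := by
  induction l with
  | nil => rfl
  | cons v rest ih => simp [pvLoopA, ih, List.replicate]

theorem pvLoopA_eq_alt (l : List Int) : pvLoopA l false = process_gemini_label_alt l := by
  induction l with
  | nil => rfl
  | cons v rest ih =>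
    simp only [process_gemini_label_alt, PySem.List.index?_eq_idxOf?, List.idxOf?_cons] at ih ⊢
    by_cases h : v = 0
    · subst h
      simp [pvLoopA, pvLoopA_true]
    · simp only [beq_iff_eq, if_neg h]
      cases hi : List.idxOf? 0 rest with
      | none => simp only [hi] at ih; simpa [pvLoopA, h, hi] using ih
      | some i =>
        simp only [hi, Option.map_some] at ih ⊢
        simp [pvLoopA, h, ih, List.take_succ_cons]

-- ===== VERDICT (by name: the statement is the Claim_ definition above) =====
theorem process_gemini_label_spec : Claim_equal_process_gemini_label := by
  intro l _
  unfold Spec_process_gemini_label process_gemini_label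
  exact pvLoopA_eq_alt l
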